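-- pv_equiv track=rewrite | github.com/jthulhu/beans | beansast/gmrreader.py | pos2coords
-- ===== SOURCE A (Python) =====
-- def pos2coords(pos, flux):
--     y = 1
--     x = 1
--     for char in flux[:pos]:
--         if char == '\n':
--             y += 1
--             x = 1
--         else:
--             x += 1
--     return x, y
-- ===== SOURCE B (Python) =====
-- def pos2coords(pos, flux):
--     sub = flux[:pos]
--     last = sub.rfind('\n')
--     return len(sub) - last, sub.count('\n') + 1
-- ===== Notes on version B (the rewrite author's own statement) =====
-- stated objective: idiomatic
-- what changed: Replaces A's fused character loop tracking (x, y) with two built-in scans on the same slice: rfind('\n') gives the column as len(sub) - last (rfind's -1 makes len+1 when no newline) and count('\n') + 1 gives the line.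
import Mathlib
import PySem

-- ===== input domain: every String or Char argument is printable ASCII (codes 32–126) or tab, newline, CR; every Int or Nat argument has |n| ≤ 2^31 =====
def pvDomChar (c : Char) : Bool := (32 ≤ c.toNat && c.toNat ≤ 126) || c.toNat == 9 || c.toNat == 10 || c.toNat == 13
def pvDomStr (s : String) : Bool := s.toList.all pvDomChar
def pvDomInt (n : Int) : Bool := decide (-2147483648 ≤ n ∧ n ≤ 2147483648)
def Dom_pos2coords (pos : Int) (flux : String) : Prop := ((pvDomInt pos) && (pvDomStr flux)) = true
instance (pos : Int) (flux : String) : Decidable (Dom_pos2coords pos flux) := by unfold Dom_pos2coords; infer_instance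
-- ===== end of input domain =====

-- B replaces A's fused (x, y)-tracking loop with two built-in scans (rfind + count) on the same slice; idiomatic, same O(n) cost.

-- ===== PORT A =====
def pos2coords (pos : Int) (flux : String) : Int × Int :=
  let sub := PySem.List.slice flux.toList none (some pos)
  let st := sub.foldl
    (fun (p : Int × Int) c => if c = '\n' then (1, p.2 + 1) else (p.1 + 1, p.2))
    (1, 1)
  (st.1, st.2)

-- ===== PORT B =====
def pos2coords_alt (pos : Int) (flux : String) : Int × Int :=
  let sub := PySem.List.slice flux.toList none (some pos)
  let last := PySem.Chars.rfind sub ['\n']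
  ((sub.length : Int) - last, (sub.count '\n' : Int) + 1)

-- ===== PRECONDITION & SPEC =====
def Spec_pos2coords (pos : Int) (flux : String) (out : Int × Int) : Prop := out = pos2coords_alt pos flux
instance (pos : Int) (flux : String) (out : Int × Int) : Decidable (Spec_pos2coords pos flux out) := by unfold Spec_pos2coords; infer_instance

-- ===== CLAIM (what is proved, stated in full; the proofs are below) =====
def Claim_equal_pos2coords : Prop := ∀ (pos : Int) (flux : String), Dom_pos2coords pos flux → Spec_pos2coords pos flux (pos2coords pos flux)

-- ===== LEMMAS AND PROOFS =====

def lastNL : List Char → Int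
  | [] => -1
  | c :: t => if lastNL t ≥ 0 then lastNL t + 1 else if c = '\n' then 0 else -1

lemma lastNL_le (l : List Char) : lastNL l ≤ (l.length : Int) - 1 := by
  induction l with
  | nil => simp [lastNL]
  | cons c t ih =>
    simp only [lastNL, List.length_cons]
    split_ifs <;> push_cast <;> omega

lemma prefix_nl (l : List Char) :
    (List.isPrefixOf ['\n'] l) = (l.head? == some '\n') := by
  cases l with
  | nil => rfl
  | cons c t => simp [List.isPrefixOf, Bool.beq_comm]

lemma lastNL_snoc (l : List Char) (c : Char) :
    lastNL (l ++ [c]) = if c = '\n' then (l.length : Int) else lastNL l := by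
  induction l with
  | nil => by_cases h : c = '\n' <;> simp [lastNL, h]
  | cons d t ih =>
    simp only [List.cons_append, lastNL, ih, List.length_cons]
    have := lastNL_le t
    by_cases h : c = '\n' <;> simp [h]

lemma go_eq_lastNL (s : List Char) (k : Nat) :
    PySem.Chars.rfind.go s ['\n'] k = lastNL (s.take (k + 1)) := by
  induction k with
  | zero =>
    show (if List.isPrefixOf ['\n'] s then (0:Int) else -1) = _
    rw [prefix_nl]
    cases s with
    | nil => simp [lastNL]
    | cons c t =>
      by_cases h : c = '\n'
      · simp [lastNL, h]
      · simp [lastNL, h]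
  | succ j ih =>
    have hgo : PySem.Chars.rfind.go s ['\n'] (j + 1) =
        if List.isPrefixOf ['\n'] (s.drop (j + 1)) then ((j : Int) + 1)
        else PySem.Chars.rfind.go s ['\n'] j := by
      simp [PySem.Chars.rfind.go]
    rw [hgo, ih, prefix_nl]
    by_cases hlen : j + 1 < s.length
    · have htake : s.take (j + 2) = s.take (j + 1) ++ [s[j + 1]] := by
        rw [List.take_add_one]
        simp [List.getElem?_eq_getElem hlen]
      rw [htake, lastNL_snoc]
      have hdrop : s.drop (j + 1) = s[j + 1] :: s.drop (j + 2) :=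
        List.drop_eq_getElem_cons hlen
      rw [hdrop]
      by_cases h : s[j + 1] = '\n'
      · simp [h, List.length_take, Nat.min_eq_left (by omega : j + 1 ≤ s.length)]
      · simp [h, List.getElem?_eq_getElem hlen]
    · have hdrop : s.drop (j + 1) = ([] : List Char) := List.drop_eq_nil_of_le (by omega)
      have htake : s.take (j + 2) = s.take (j + 1) := by
        rw [List.take_of_length_le (by omega), List.take_of_length_le (by omega)]
      rw [hdrop, htake]
      simp

lemma rfind_eq_lastNL (s : List Char) : PySem.Chars.rfind s ['\n'] = lastNL s := by
  show PySem.Chars.rfind.go s ['\n'] s.length = _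
  rw [go_eq_lastNL, List.take_of_length_le (by omega)]

lemma foldl_step (l : List Char) : ∀ (x y : Int),
    l.foldl (fun (p : Int × Int) c => if c = '\n' then (1, p.2 + 1) else (p.1 + 1, p.2)) (x, y)
    = ((if lastNL l ≥ 0 then (l.length : Int) - lastNL l else x + l.length),
       y + l.count '\n') := by
  induction l with
  | nil => intro x y; simp [lastNL]
  | cons c t ih =>
    intro x y
    have hle := lastNL_le t
    by_cases h : c = '\n'
    · simp only [List.foldl_cons, h, ih, lastNL, List.length_cons, List.count_cons,
        Prod.mk.injEq, beq_self_eq_true, if_true]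
      split_ifs <;> push_cast <;> omega
    · simp only [List.foldl_cons, ih, lastNL, List.length_cons, List.count_cons,
        Prod.mk.injEq, if_neg (by simpa using h),
        beq_eq_false_iff_ne.mpr h]
      split_ifs <;> (try simp_all) <;> omega

-- ===== VERDICT (by name: the statement is the Claim_ definition above) =====
theorem pos2coords_spec : Claim_equal_pos2coords := by
  intro pos flux _
  show _ = _
  simp only [pos2coords, pos2coords_alt, foldl_step, rfind_eq_lastNL]
  have h1 := lastNL_le (PySem.List.slice flux.toList none (some pos))
  have h2 : lastNL (PySem.List.slice flux.toList none (some pos)) ≥ 0 ∨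
      lastNL (PySem.List.slice flux.toList none (some pos)) = -1 := by
    generalize (PySem.List.slice flux.toList none (some pos)) = l
    induction l with
    | nil => simp [lastNL]
    | cons c t ih => simp only [lastNL]; split_ifs <;> omega
  split_ifs <;> simp only [Prod.mk.injEq] <;> refine ⟨?_, ?_⟩ <;> push_cast <;> first | trivial | omega
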